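-- pv_equiv track=rewrite | github.com/WCBru/Loose-Scripts | Small Challenges/Daily Programmer/20180221_7Wonders.py | allocateExactMatches
-- ===== SOURCE A (Python) =====
-- def countToDict(enum):
--     register = {}
--     for elm in enum:
--             if elm in register:
--                 register[elm] += 1
--             else:
--                 register[elm] = 0
--     return register
--
-- def allocateExactMatches(target, deck, ded, depth):
--     out = False
--     needed = countToDict(target)
--     available = countToDict([char for card in deck for char in card.split('/')])
--     deductionList = []
--
--     for resrc in needed: # For all needed
--         if needed[resrc] == available.get(resrc):
--             for card in range(len(deck)):
--                 if resrc in deck[card].split('/') and resrc != deck[card]: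
--                     deductionList.append((card, deck[card]))
--                     out = True
--                     deck[card] = resrc
--
--     if len(ded) <= depth:
--         ded.append(deductionList)
--     else:
--         ded[depth] += deductionList
--     return out
-- ===== SOURCE B (Python) =====
-- def allocateExactMatches(target, deck, ded, depth):
--     # Exact-count targets: count occurrences, build a token -> card-indices index once,
--     # then only walk candidate cards, marking allocated ones.
--     tcount = {}
--     for r in target:
--         tcount[r] = tcount.get(r, 0) + 1
--     dcount = {}
--     index = {}
--     for i, card in enumerate(deck):
--         for tok in card.split('/'):
--             dcount[tok] = dcount.get(tok, 0) + 1
--             index.setdefault(tok, []).append(i)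
--     allocated = set()
--     deductions = []
--     for resrc in tcount:
--         if dcount.get(resrc) == tcount[resrc]:
--             for i in index[resrc]:
--                 if i not in allocated and deck[i] != resrc:
--                     allocated.add(i)
--                     deductions.append((i, deck[i]))
--                     deck[i] = resrc
--     if len(ded) <= depth:
--         ded.append(deductions)
--     else:
--         ded[depth] += deductions
--     return bool(deductions)
-- ===== Notes on version B (the rewrite author's own statement) =====
-- stated objective: faster
-- what changed: B counts with get-based counters in one pass, builds a resource-to-card-index inverted index over the deck once, and for each exactly-matched resource walks only its candidate card indices with an allocated-index set, instead of A's rescan of the whole deck (re-splitting every card) for every needed resource.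
import Mathlib
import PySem

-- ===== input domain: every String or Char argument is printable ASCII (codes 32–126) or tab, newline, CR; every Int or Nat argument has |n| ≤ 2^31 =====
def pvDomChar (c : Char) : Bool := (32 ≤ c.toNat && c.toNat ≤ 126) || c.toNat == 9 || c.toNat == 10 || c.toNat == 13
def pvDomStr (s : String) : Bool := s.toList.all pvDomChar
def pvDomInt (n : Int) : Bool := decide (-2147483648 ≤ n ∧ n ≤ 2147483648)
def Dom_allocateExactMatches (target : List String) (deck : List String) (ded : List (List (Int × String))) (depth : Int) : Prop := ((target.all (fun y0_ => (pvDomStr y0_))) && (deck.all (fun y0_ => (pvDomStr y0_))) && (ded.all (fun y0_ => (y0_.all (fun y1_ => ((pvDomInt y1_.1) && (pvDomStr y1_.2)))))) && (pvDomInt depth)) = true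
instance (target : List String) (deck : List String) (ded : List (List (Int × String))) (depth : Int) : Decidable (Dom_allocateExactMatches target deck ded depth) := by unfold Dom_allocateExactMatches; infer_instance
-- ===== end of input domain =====

-- B replaces A's per-resource rescan of the whole deck by one-pass counters plus an
-- inverted token→card-index index with an allocated-index set (objective: faster).
-- Both A and B mutate `deck` and `ded` in place in the same way; the equivalence
-- proved here is about the RETURN value (B performs the same mutations as A).

-- ===== PORT A =====
-- card.split('/') : the separator is nonempty, so split? is always `some` — getD [] is exact
def pvTokens (card : String) : List String :=
  (PySem.Str.split? card "/").getD []

def countToDict (enum : List String) : PySem.Dict String Int :=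
  enum.foldl (fun register elm =>
      if register.contains elm then register.modify elm 0 (· + 1)
      else register.insert elm 0)
    PySem.Dict.empty

-- the body of A's inner `for card in range(len(deck))` loop; state = (out, deck, deductionList)
def pvInnerA (resrc : String) (st2 : Bool × List String × List (Int × String)) (card : Int) :
    Bool × List String × List (Int × String) :=
  let c := PySem.List.pyGetD st2.2.1 card ""
  if (pvTokens c).contains resrc && resrc != c then
    (true, PySem.List.pySetD st2.2.1 card resrc, st2.2.2 ++ [(card, c)])
  else st2

-- the body of A's outer `for resrc in needed` loop
def pvOuterA (needed available : PySem.Dict String Int)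
    (st : Bool × List String × List (Int × String)) (resrc : String) :
    Bool × List String × List (Int × String) :=
  if needed.get? resrc == available.get? resrc then
    (PySem.List.pyRange 0 (st.2.1.length : Int)).foldl (pvInnerA resrc) st
  else st

def allocateExactMatches (target : List String) (deck : List String)
    (ded : List (List (Int × String))) (depth : Int) : Bool :=
  let needed := countToDict target
  let available := countToDict (deck.flatMap (fun card => pvTokens card))
  let res := needed.keys.foldl (pvOuterA needed available) (false, deck, [])
  -- the trailing `ded.append(deductionList)` / `ded[depth] += deductionList` only mutates
  -- `ded` (Pre_ excludes the IndexError for depth < -len(ded)); the returned value is `out`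
  res.1

-- ===== PORT B =====
-- body of B's inner `for i in index[resrc]` loop; state = (allocated, deck, deductions)
def pvInnerB (resrc : String) (st2 : PySem.Set Int × List String × List (Int × String)) (i : Int) :
    PySem.Set Int × List String × List (Int × String) :=
  if !(st2.1.contains i) && PySem.List.pyGetD st2.2.1 i "" != resrc then
    (st2.1.add i, PySem.List.pySetD st2.2.1 i resrc,
     st2.2.2 ++ [(i, PySem.List.pyGetD st2.2.1 i "")])
  else st2

-- body of B's outer `for resrc in tcount` loop; `index[resrc]` is present whenever the
-- guard holds (dcount.get(resrc) == tcount[resrc] ≥ 1), so getD [] is exact there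
def pvOuterB (tcount dcount : PySem.Dict String Int) (index : PySem.Dict String (List Int))
    (st : PySem.Set Int × List String × List (Int × String)) (resrc : String) :
    PySem.Set Int × List String × List (Int × String) :=
  if dcount.get? resrc == tcount.get? resrc then
    (index.getD resrc []).foldl (pvInnerB resrc) st
  else st

def allocateExactMatches_alt (target : List String) (deck : List String)
    (ded : List (List (Int × String))) (depth : Int) : Bool :=
  let tcount := target.foldl (fun d r => d.insert r (d.getD r 0 + 1)) PySem.Dict.empty
  -- one pass over enumerate(deck): token counts and the inverted index together;
  -- `index.setdefault(tok, []).append(i)` is exactly `modify tok [] (· ++ [i])`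
  let scan := (PySem.List.enumerate deck).foldl
    (fun (st : PySem.Dict String Int × PySem.Dict String (List Int)) p =>
      (pvTokens p.2).foldl
        (fun st tok =>
          (st.1.insert tok (st.1.getD tok 0 + 1), st.2.modify tok [] (· ++ [p.1])))
        st)
    (PySem.Dict.empty, PySem.Dict.empty)
  let res := tcount.keys.foldl (pvOuterB tcount scan.1 scan.2) (PySem.Set.empty, deck, [])
  -- the trailing mutation of `ded` is the same as A's; the returned value is bool(deductions)
  !res.2.2.isEmpty

-- ===== PRECONDITION & SPEC =====
-- Pre_ excludes exactly the inputs where the final `ded[depth] += deductionList` raises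
-- IndexError (depth < -len(ded)); both A and B raise there.
def Pre_allocateExactMatches (target : List String) (deck : List String) (ded : List (List (Int × String))) (depth : Int) : Prop :=
  -(ded.length : Int) ≤ depth
instance (target : List String) (deck : List String) (ded : List (List (Int × String))) (depth : Int) : Decidable (Pre_allocateExactMatches target deck ded depth) := by unfold Pre_allocateExactMatches; infer_instance

def pvWitness_allocateExactMatches : List String × List String × (List (List (Int × String))) × Int :=
  (["W", "S"], ["W/S", "B"], [], 0)

def Spec_allocateExactMatches (target : List String) (deck : List String) (ded : List (List (Int × String))) (depth : Int) (out : Bool) : Prop := out = allocateExactMatches_alt target deck ded depth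
instance (target : List String) (deck : List String) (ded : List (List (Int × String))) (depth : Int) (out : Bool) : Decidable (Spec_allocateExactMatches target deck ded depth out) := by unfold Spec_allocateExactMatches; infer_instance

-- ===== CLAIM (what is proved, stated in full; the proofs are below) =====
def Claim_equal_allocateExactMatches : Prop := ∀ (target : List String) (deck : List String) (ded : List (List (Int × String))) (depth : Int), Dom_allocateExactMatches target deck ded depth → Pre_allocateExactMatches target deck ded depth → Spec_allocateExactMatches target deck ded depth (allocateExactMatches target deck ded depth)

-- ===== LEMMAS AND PROOFS =====

-- the candidate predicate both loops test against the (still unchanged) deck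
def pvPred (r c : String) : Bool := (pvTokens c).contains r && r != c

theorem pv_dict_get?_eq {κ ν : Type} [BEq κ] (d : PySem.Dict κ ν) (k : κ) (d0 : ν) :
    d.get? k = if d.contains k then some (d.getD k d0) else none := by
  rw [PySem.Dict.contains_eq_isSome_get?, PySem.Dict.getD_eq_get?_getD]
  cases d.get? k <;> simp

theorem pv_counter_get? {κ : Type} [BEq κ] [LawfulBEq κ] (xs : List κ) (v : κ) :
    (PySem.Dict.counter xs).get? v = if xs.contains v then some ((xs.count v : Int)) else none := by
  rw [pv_dict_get?_eq _ v 0, PySem.Dict.contains_counter, PySem.Dict.getD_counter]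

theorem countToDict_get?_aux (l : List String) :
    ∀ (d : PySem.Dict String Int) (r : String),
      (l.foldl (fun register elm =>
          if register.contains elm then register.modify elm 0 (· + 1)
          else register.insert elm 0) d).get? r
      = match d.get? r with
        | some v => some (v + (l.count r : Int))
        | none => if l.contains r then some ((l.count r : Int) - 1) else none := by
  induction l with
  | nil => intro d r; cases h : d.get? r <;> simp [h]
  | cons x l ih =>
    intro d r
    simp only [List.foldl_cons]
    rw [ih]
    by_cases hcx : d.contains x = true
    · simp only [hcx, if_true]
      have hg : (d.modify x 0 (· + 1)).get? r =
          if r = x then some (d.getD x 0 + 1) else d.get? r := by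
        rw [pv_dict_get?_eq _ r 0, PySem.Dict.contains_modify, PySem.Dict.getD_modify]
        by_cases hrx : r = x
        · simp [hrx, hcx]
        · simp [hrx, (by simpa using hrx : (r == x) = false)]
          rw [pv_dict_get?_eq _ r 0]
      rw [hg]
      by_cases hrx : r = x
      · subst hrx
        rw [pv_dict_get?_eq _ r 0]
        simp [hcx, List.count_cons]
        push_cast; ring
      · have hxr : ¬ x = r := fun h => hrx h.symm
        simp [List.count_cons, hrx, hxr]
    · simp only [hcx, if_false, Bool.false_eq_true]
      rw [PySem.Dict.get?_insert]
      by_cases hrx : r = x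
      · subst hrx
        have : d.get? r = none := by
          rw [pv_dict_get?_eq _ r 0]; simp [hcx]
        simp [this, List.count_cons, List.contains_cons]
      · have hxr : ¬ x = r := fun h => hrx h.symm
        simp [hrx, hxr, List.count_cons]

theorem countToDict_get? (l : List String) (r : String) :
    (countToDict l).get? r = if l.contains r then some ((l.count r : Int) - 1) else none := by
  unfold countToDict
  rw [countToDict_get?_aux]
  simp [PySem.Dict.get?_empty]

theorem countToDict_keys_aux (l : List String) :
    ∀ (d : PySem.Dict String Int),
      (l.foldl (fun register elm =>
          if register.contains elm then register.modify elm 0 (· + 1)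
          else register.insert elm 0) d).keys = PySem.Set.update d.keys l := by
  induction l with
  | nil => intro d; simp [PySem.Set.update]
  | cons x l ih =>
    intro d
    simp only [List.foldl_cons]
    rw [ih]
    by_cases hcx : d.contains x = true
    · rw [if_pos hcx, PySem.Dict.keys_modify, PySem.Dict.keys_insert_of_contains _ _ hcx]
      have hmem : (PySem.Set.contains d.keys x) = true := by
        simp [PySem.Set.contains]
        exact (PySem.Dict.contains_iff_mem_keys d x).mp hcx
      simp [PySem.Set.update, List.foldl_cons, PySem.Set.add, hmem]
      rw [if_pos ((PySem.Dict.contains_iff_mem_keys d x).mp hcx)]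
    · rw [if_neg hcx, PySem.Dict.keys_insert_of_not_contains _ _ (by simpa using hcx)]
      have hmem : (PySem.Set.contains d.keys x) = false := by
        simp [PySem.Set.contains]
        intro h
        exact absurd ((PySem.Dict.contains_iff_mem_keys d x).mpr h) (by simpa using hcx)
      simp [PySem.Set.update, List.foldl_cons, PySem.Set.add]
      rw [if_neg (fun h => absurd ((PySem.Dict.contains_iff_mem_keys d x).mpr h) (by simpa using hcx))]

theorem countToDict_keys (l : List String) : (countToDict l).keys = PySem.Set.ofList l := by
  unfold countToDict
  rw [countToDict_keys_aux]
  simp [PySem.Dict.keys_empty, PySem.Set.update, PySem.Set.ofList]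

theorem innerA_go (r : String) :
    ∀ (k a : Nat) (out : Bool) (dk : List String) (dl : List (Int × String)),
      dk.length = a + k →
      ((PySem.List.pyRange (a : Int) ((a + k : Nat) : Int)).foldl (pvInnerA r) (out, dk, dl)).1
        = (out || (dk.drop a).any (pvPred r))
      ∧ ((dk.drop a).any (pvPred r) = false →
          ((PySem.List.pyRange (a : Int) ((a + k : Nat) : Int)).foldl (pvInnerA r) (out, dk, dl)).2.1 = dk) := by
  intro k
  induction k with
  | zero =>
    intro a out dk dl hlen
    rw [PySem.List.pyRange_one_eq_nil (by omega)]
    simp [List.drop_of_length_le (by omega : dk.length ≤ a)]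
  | succ k ih =>
    intro a out dk dl hlen
    have ha : (a : Int) < ((a + (k+1) : Nat) : Int) := by push_cast; omega
    rw [PySem.List.pyRange_one_cons ha]
    have halt : a < dk.length := by omega
    have hget : PySem.List.pyGetD dk (a : Int) "" = dk[a] := by
      rw [PySem.List.pyGetD_natCast]; simp [List.getD_eq_getElem?_getD, halt]
    have hdrop : dk.drop a = dk[a] :: dk.drop (a+1) := List.drop_eq_getElem_cons halt
    simp only [List.foldl_cons]
    by_cases hp : pvPred r dk[a] = true
    · have hstep : pvInnerA r (out, dk, dl) (a : Int)
          = (true, PySem.List.pySetD dk (a : Int) r, dl ++ [((a : Int), dk[a])]) := by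
        simp only [pvInnerA, hget]
        rw [if_pos (by simpa [pvPred] using hp)]
      rw [hstep]
      have hset : PySem.List.pySetD dk (a : Int) r = dk.set a r := by
        simp [PySem.List.pySetD_natCast]
      have hlen2 : (dk.set a r).length = (a+1) + k := by simp; omega
      have hcast : ((a : Nat) + (k+1) : Nat) = ((a+1) + k : Nat) := by omega
      rw [hcast, hset]
      have := ih (a+1) true (dk.set a r) (dl ++ [((a : Int), dk[a])]) hlen2
      push_cast at this ⊢
      constructor
      · rw [this.1]; rw [hdrop, List.any_cons, hp]; simp
      · intro hany
        exfalso
        rw [hdrop, List.any_cons, hp] at hany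
        simp at hany
    · have hstep : pvInnerA r (out, dk, dl) (a : Int) = (out, dk, dl) := by
        simp only [pvInnerA, hget]
        rw [if_neg (by simpa [pvPred] using hp)]
      rw [hstep]
      have hlen2 : dk.length = (a+1) + k := by omega
      have hcast : ((a : Nat) + (k+1) : Nat) = ((a+1) + k : Nat) := by omega
      rw [hcast]
      have := ih (a+1) out dk dl hlen2
      push_cast at this ⊢
      have hp' : pvPred r dk[a] = false := by simpa using hp
      constructor
      · rw [this.1, hdrop, List.any_cons, hp']; simp
      · intro hany
        rw [hdrop, List.any_cons, hp'] at hany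
        simp only [Bool.false_or] at hany
        exact this.2 hany

theorem innerA_full (r : String) (out : Bool) (dk : List String) (dl : List (Int × String)) :
    ((PySem.List.pyRange 0 (dk.length : Int)).foldl (pvInnerA r) (out, dk, dl)).1
      = (out || dk.any (pvPred r))
    ∧ (dk.any (pvPred r) = false →
        ((PySem.List.pyRange 0 (dk.length : Int)).foldl (pvInnerA r) (out, dk, dl)).2.1 = dk) := by
  have := innerA_go r dk.length 0 out dk dl (by omega)
  simpa using this

theorem outerA_spec (needed available : PySem.Dict String Int) :
    ∀ (rs : List String) (out : Bool) (dk : List String) (dl : List (Int × String)),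
      ((rs.foldl (pvOuterA needed available) (out, dk, dl)).1)
        = (out || rs.any (fun r => (needed.get? r == available.get? r) && dk.any (pvPred r))) := by
  intro rs
  induction rs with
  | nil => intro out dk dl; simp
  | cons r rs ih =>
    intro out dk dl
    simp only [List.foldl_cons, List.any_cons]
    by_cases hc : (needed.get? r == available.get? r) = true
    · have hstep : pvOuterA needed available (out, dk, dl) r
          = (PySem.List.pyRange 0 (dk.length : Int)).foldl (pvInnerA r) (out, dk, dl) := by
        simp only [pvOuterA, hc, if_true]
      rw [hstep]
      rcases hres : (PySem.List.pyRange 0 (dk.length : Int)).foldl (pvInnerA r) (out, dk, dl) with ⟨o', dk', dl'⟩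
      have h1 : o' = (out || dk.any (pvPred r)) := by
        have h := (innerA_full r out dk dl).1; rw [hres] at h; exact h
      by_cases hcand : dk.any (pvPred r) = true
      · have ho : o' = true := by rw [h1, hcand]; simp
        rw [ih o' dk' dl', ho]
        simp [hc, hcand]
      · have hcand' : dk.any (pvPred r) = false := by simpa using hcand
        have hdk : dk' = dk := by
          have h := (innerA_full r out dk dl).2 hcand'
          rw [hres] at h; exact h
        have ho : o' = out := by rw [h1, hcand']; simp
        rw [ih o' dk' dl', ho, hdk]
        simp [hc, hcand']
    · have hstep : pvOuterA needed available (out, dk, dl) r = (out, dk, dl) := by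
        simp only [pvOuterA]
        rw [if_neg (by simpa using hc)]
      rw [hstep, ih out dk dl]
      have hc' : (needed.get? r == available.get? r) = false := by simpa using hc
      rw [hc']
      simp

-- once the deduction list is non-empty it stays non-empty
theorem innerB_mono (r : String) :
    ∀ (idxs : List Int) (al : PySem.Set Int) (dk : List String) (dl : List (Int × String)),
      dl.isEmpty = false → ((idxs.foldl (pvInnerB r) (al, dk, dl)).2.2.isEmpty = false) := by
  intro idxs
  induction idxs with
  | nil => intro al dk dl h; simpa using h
  | cons i idxs ih =>
    intro al dk dl h
    simp only [List.foldl_cons]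
    unfold pvInnerB
    split
    · exact ih _ _ _ (by simp)
    · exact ih _ _ _ h

theorem innerB_go (r : String) :
    ∀ (idxs : List Int) (al : PySem.Set Int) (dk : List String) (dl : List (Int × String)),
      ((idxs.foldl (pvInnerB r) (al, dk, dl)).2.2.isEmpty
        = (dl.isEmpty && !(idxs.any (fun i => !(al.contains i) && PySem.List.pyGetD dk i "" != r))))
      ∧ ((idxs.any (fun i => !(al.contains i) && PySem.List.pyGetD dk i "" != r)) = false →
          idxs.foldl (pvInnerB r) (al, dk, dl) = (al, dk, dl)) := by
  intro idxs
  induction idxs with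
  | nil => intro al dk dl; simp
  | cons i idxs ih =>
    intro al dk dl
    simp only [List.foldl_cons, List.any_cons]
    by_cases hp : (!(al.contains i) && PySem.List.pyGetD dk i "" != r) = true
    · have hstep : pvInnerB r (al, dk, dl) i
          = (al.add i, PySem.List.pySetD dk i r, dl ++ [(i, PySem.List.pyGetD dk i "")]) := by
        simp only [pvInnerB]; rw [if_pos hp]
      rw [hstep, hp]
      constructor
      · rw [innerB_mono r idxs _ _ _ (by simp)]
        simp
      · intro hany; simp at hany
    · have hp' : (!(al.contains i) && PySem.List.pyGetD dk i "" != r) = false := by simpa using hp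
      have hstep : pvInnerB r (al, dk, dl) i = (al, dk, dl) := by
        simp only [pvInnerB]; rw [if_neg (by rw [hp']; simp)]
      rw [hstep, hp']
      simpa using ih al dk dl

theorem outerB_mono (tcount dcount : PySem.Dict String Int) (index : PySem.Dict String (List Int)) :
    ∀ (rs : List String) (al : PySem.Set Int) (dk : List String) (dl : List (Int × String)),
      dl.isEmpty = false →
      ((rs.foldl (pvOuterB tcount dcount index) (al, dk, dl)).2.2.isEmpty = false) := by
  intro rs
  induction rs with
  | nil => intro al dk dl h; simpa using h
  | cons r rs ih =>
    intro al dk dl h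
    simp only [List.foldl_cons]
    unfold pvOuterB
    split
    · rcases hres : (index.getD r []).foldl (pvInnerB r) (al, dk, dl) with ⟨al2, dk2, dl2⟩
      have hm := innerB_mono r (index.getD r []) al dk dl h
      rw [hres] at hm
      exact ih al2 dk2 dl2 hm
    · exact ih al dk dl h


theorem outerB_spec (tcount dcount : PySem.Dict String Int) (index : PySem.Dict String (List Int)) :
    ∀ (rs : List String) (al : PySem.Set Int) (dk : List String) (dl : List (Int × String)),
      ((rs.foldl (pvOuterB tcount dcount index) (al, dk, dl)).2.2.isEmpty)
        = (dl.isEmpty && !(rs.any (fun r => (dcount.get? r == tcount.get? r)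
            && (index.getD r []).any (fun i => !(al.contains i) && PySem.List.pyGetD dk i "" != r)))) := by
  intro rs
  induction rs with
  | nil => intro al dk dl; simp
  | cons r rs ih =>
    intro al dk dl
    simp only [List.foldl_cons, List.any_cons]
    by_cases hc : (dcount.get? r == tcount.get? r) = true
    · have hstep : pvOuterB tcount dcount index (al, dk, dl) r
          = (index.getD r []).foldl (pvInnerB r) (al, dk, dl) := by
        simp only [pvOuterB, hc, if_true]
      rw [hstep]
      by_cases hcand : ((index.getD r []).any (fun i => !(al.contains i) && PySem.List.pyGetD dk i "" != r)) = true
      · -- something is appended: dl' nonempty; everything stays nonempty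
        rcases hres : (index.getD r []).foldl (pvInnerB r) (al, dk, dl) with ⟨al', dk', dl'⟩
        have h1 := (innerB_go r (index.getD r []) al dk dl).1
        rw [hres] at h1
        have hdl' : dl'.isEmpty = false := by rw [h1, hcand]; simp
        have hmono := outerB_mono tcount dcount index rs al' dk' dl' hdl'
        rw [hmono, hc, hcand]
        simp only [Bool.true_and, Bool.true_or, Bool.not_true, Bool.and_false]
      · have hcand' := Bool.eq_false_iff.mpr hcand
        rw [(innerB_go r (index.getD r []) al dk dl).2 hcand']
        rw [ih al dk dl, hc, hcand']
        simp
    · have hc' : (dcount.get? r == tcount.get? r) = false := by simpa using hc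
      have hstep : pvOuterB tcount dcount index (al, dk, dl) r = (al, dk, dl) := by
        simp only [pvOuterB]; rw [if_neg (by simp [hc'])]
      rw [hstep, ih al dk dl, hc']
      simp

-- flattening a fold over a flatMap into a nested fold
theorem pv_foldl_flatMap {α β σ : Type} (g : α → List β) (f : σ → β → σ) (l : List α) (init : σ) :
    (l.flatMap g).foldl f init = l.foldl (fun acc x => (g x).foldl f acc) init := by
  induction l generalizing init with
  | nil => simp
  | cons x l ih => simp [List.foldl_append, ih]

theorem pv_any_congr {α : Type} (l : List α) (f g : α → Bool)
    (h : ∀ x ∈ l, f x = g x) : l.any f = l.any g := by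
  induction l with
  | nil => rfl
  | cons x l ih => simp [List.any_cons, h x (List.mem_cons_self), ih (fun y hy => h y (List.mem_cons_of_mem _ hy))]

-- the one-pass scan of B computes the token counter and the inverted index
theorem pv_scanB (deck : List String) :
    (PySem.List.enumerate deck).foldl
      (fun (st : PySem.Dict String Int × PySem.Dict String (List Int)) p =>
        (pvTokens p.2).foldl
          (fun st tok => (st.1.insert tok (st.1.getD tok 0 + 1), st.2.modify tok [] (· ++ [p.1]))) st)
      (PySem.Dict.empty, PySem.Dict.empty)
    = (PySem.Dict.counter (deck.flatMap (fun card => pvTokens card)),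
       ((PySem.List.enumerate deck).flatMap (fun p => (pvTokens p.2).map (fun t => (t, p.1)))).foldl
         (fun d q => d.modify q.1 [] (· ++ [q.2])) PySem.Dict.empty) := by
  have hstep : (fun (st : PySem.Dict String Int × PySem.Dict String (List Int)) (p : Int × String) =>
      (pvTokens p.2).foldl (fun st tok => (st.1.insert tok (st.1.getD tok 0 + 1), st.2.modify tok [] (· ++ [p.1]))) st)
    = (fun st p => ((pvTokens p.2).foldl (fun d tok => d.insert tok (d.getD tok 0 + 1)) st.1,
                    (pvTokens p.2).foldl (fun d tok => d.modify tok [] (· ++ [p.1])) st.2)) := by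
    funext st p
    cases st
    exact PySem.List.foldl_prod_mk
      (fun (d : PySem.Dict String Int) tok => d.insert tok (d.getD tok 0 + 1))
      (fun (d : PySem.Dict String (List Int)) tok => d.modify tok [] (· ++ [p.1])) (pvTokens p.2) _ _
  rw [hstep, PySem.List.foldl_prod_mk
      (fun (a : PySem.Dict String Int) (p : Int × String) =>
        (pvTokens p.2).foldl (fun d tok => d.insert tok (d.getD tok 0 + 1)) a)
      (fun (b : PySem.Dict String (List Int)) (p : Int × String) =>
        (pvTokens p.2).foldl (fun d tok => d.modify tok [] (· ++ [p.1])) b)]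
  have henum : (PySem.List.enumerate deck).flatMap (fun p => pvTokens p.2)
      = deck.flatMap (fun card => pvTokens card) := by
    conv_rhs => rw [← PySem.List.map_snd_enumerate deck 0]
    rw [List.flatMap_map]
  rw [Prod.mk.injEq]
  refine ⟨?_, ?_⟩
  · rw [← pv_foldl_flatMap, henum, PySem.Dict.foldl_insert_getD_add_one_eq_counter]
  · rw [pv_foldl_flatMap]
    simp only [List.foldl_map]

-- the inverted index at key r lists exactly the positions of cards containing token r
theorem pv_index_getD (deck : List String) (r : String) :
    (((PySem.List.enumerate deck).flatMap (fun p => (pvTokens p.2).map (fun t => (t, p.1)))).foldl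
        (fun d q => d.modify q.1 [] (· ++ [q.2])) PySem.Dict.empty).getD r []
    = ((((PySem.List.enumerate deck).flatMap (fun p => (pvTokens p.2).map (fun t => (t, p.1)))).filter
        (fun q => q.1 == r)).map (fun q => q.2)) := by
  rw [PySem.Dict.getD_foldl_modify_append]
  simp [PySem.Dict.getD_empty]

-- with nothing allocated yet, B's candidate scan over the index agrees with
-- A's candidate scan over the whole deck
theorem pv_cand_eq (deck : List String) (r : String) :
    ((((PySem.List.enumerate deck).flatMap (fun p => (pvTokens p.2).map (fun t => (t, p.1)))).foldl
        (fun d q => d.modify q.1 [] (· ++ [q.2])) PySem.Dict.empty).getD r []).any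
      (fun i => !(PySem.Set.contains PySem.Set.empty i) && PySem.List.pyGetD deck i "" != r)
    = deck.any (pvPred r) := by
  rw [pv_index_getD]
  rw [Bool.eq_iff_iff]
  simp [List.any_eq_true, List.mem_map, List.mem_filter, List.mem_flatMap,
    PySem.List.enumerate_eq_map_pyRange deck "", pvPred,
    PySem.Set.contains, PySem.Set.empty, PySem.List.mem_pyRange_one, Prod.exists, Prod.mk.injEq]
  constructor
  · rintro ⟨x, ⟨hx0, hxl⟩, hmem, hne⟩
    have hg : PySem.List.pyGetD deck x "" = deck[x.toNat] :=
      PySem.List.pyGetD_eq_getElem deck "" hx0 (by simpa using hxl)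
    rw [hg] at hmem hne
    exact ⟨deck[x.toNat], List.getElem_mem _, hmem, fun h => hne h.symm⟩
  · rintro ⟨c, hc, hmem, hne⟩
    obtain ⟨j, hj, rfl⟩ := List.mem_iff_getElem.mp hc
    have hg : PySem.List.pyGetD deck (j : Int) "" = deck[j] := by
      rw [PySem.List.pyGetD_natCast]
      simp [List.getD_eq_getElem?_getD, hj]
    refine ⟨(j : Int), ⟨by omega, by exact_mod_cast hj⟩, ?_, ?_⟩
    · rw [hg]; exact hmem
    · rw [hg]; exact fun h => hne h.symm

-- for a needed resource, A's needed/available comparison and B's dcount/tcount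
-- comparison are the same test
theorem pv_cond_eq (target deck : List String) (r : String) (hr : r ∈ target) :
    ((countToDict target).get? r == (countToDict (deck.flatMap (fun card => pvTokens card))).get? r)
    = ((PySem.Dict.counter (deck.flatMap (fun card => pvTokens card))).get? r
        == (PySem.Dict.counter target).get? r) := by
  rw [countToDict_get?, countToDict_get?, pv_counter_get?, pv_counter_get?]
  have hrt : target.contains r = true := by simpa using hr
  rw [hrt]
  by_cases hT : (deck.flatMap (fun card => pvTokens card)).contains r = true
  · rw [hT]
    simp only [if_true]
    rw [Bool.eq_iff_iff]
    simp only [beq_iff_eq, Option.some.injEq]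
    omega
  · rw [Bool.eq_false_iff.mpr hT]
    simp

theorem allocateExactMatches_spec : Claim_equal_allocateExactMatches := by
  unfold Claim_equal_allocateExactMatches
  intro target deck ded depth _ _
  unfold Spec_allocateExactMatches
  simp only [allocateExactMatches, allocateExactMatches_alt]
  rw [pv_scanB, PySem.Dict.foldl_insert_getD_add_one_eq_counter]
  rw [outerA_spec, outerB_spec]
  rw [countToDict_keys, PySem.Dict.keys_counter]
  simp only [List.isEmpty_nil, Bool.true_and, Bool.false_or, Bool.not_not]
  refine pv_any_congr _ _ _ (fun r hrS => ?_)
  have hr : r ∈ target := (PySem.Set.mem_ofList target r).mp hrS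
  rw [pv_cond_eq target deck r hr, pv_cand_eq]
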